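-- pv_equiv track=rewrite | github.com/namashin/AlgorithmPy | Question/main.py | order_list_by_index
-- ===== SOURCE A (Python) =====
-- from typing import List, Tuple
--
-- def order_list_by_index(chars: List[str], indexes: List[int]) -> str:
--     i, len_indexes = 0, len(indexes)
--
--     while i < len_indexes:
--         while i != indexes[i]:
--             index = indexes[i]
--
--             chars[i], chars[index] = chars[index], chars[i]
--             indexes[i], indexes[index] = indexes[index], indexes[i]
--
--         i += 1
--
--     return ''.join(chars)
-- ===== SOURCE B (Python) =====
-- def order_list_by_index(chars, indexes):
--     result = list(chars)
--     for c, idx in zip(chars, indexes):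
--         result[idx] = c
--     return ''.join(result)
-- ===== Notes on version B (the rewrite author's own statement) =====
-- stated objective: simpler
-- what changed: Replaces A's in-place cycle-following double-swap loop over both arrays with a single scatter pass into a fresh copy of chars (and B does not mutate its arguments, unlike A).
-- outside the precondition, e.g. on order_list_by_index(['a'], [0, 1]): A returns 'a', B returns 'a'
import Mathlib
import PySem

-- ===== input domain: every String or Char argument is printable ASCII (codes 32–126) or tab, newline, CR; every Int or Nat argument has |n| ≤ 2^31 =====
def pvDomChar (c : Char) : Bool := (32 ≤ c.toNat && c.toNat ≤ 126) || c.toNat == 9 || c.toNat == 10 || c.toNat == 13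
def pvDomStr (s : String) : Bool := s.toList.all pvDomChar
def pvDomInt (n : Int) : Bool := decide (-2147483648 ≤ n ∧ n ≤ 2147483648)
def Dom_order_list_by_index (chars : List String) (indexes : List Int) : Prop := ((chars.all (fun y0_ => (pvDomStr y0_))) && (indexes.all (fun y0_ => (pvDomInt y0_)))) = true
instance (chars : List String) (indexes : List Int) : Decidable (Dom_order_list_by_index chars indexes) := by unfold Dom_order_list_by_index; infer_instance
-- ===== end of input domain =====

-- B replaces A's in-place cycle-following double-swap loop with a single scatter
-- pass into a fresh copy of chars (objective: simpler).  A mutates both arguments in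
-- place (indexes ends as the identity); B does not — the claim is about the RETURN
-- value only.

-- ===== PORT A =====
-- inner 'while i != indexes[i]' loop; fuel makes the (possibly non-terminating
-- outside Pre_) Python loop total — under Pre_ the fuel is never exhausted.
-- pyGet? = none is where Python would raise IndexError (outside Pre_).
def aInner : Nat → List String → List Int → Nat → List String × List Int
  | 0, cs, is, _ => (cs, is)
  | Nat.succ fuel, cs, is, i =>
    match PySem.List.pyGet? is (i : Int) with
    | none => (cs, is)
    | some k =>
      if k = (i : Int) then (cs, is)
      else
        match PySem.List.pyGet? cs (i : Int), PySem.List.pyGet? cs k, PySem.List.pyGet? is k with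
        | some ci, some ck, some ik =>
            aInner fuel (PySem.List.pySetD (PySem.List.pySetD cs (i : Int) ck) k ci)
                        (PySem.List.pySetD (PySem.List.pySetD is (i : Int) ik) k k) i
        | _, _, _ => (cs, is)

-- outer 'while i < len_indexes' loop
def aOuter (cs : List String) (is : List Int) (i n : Nat) : List String :=
  if _h : i < n then
    let p := aInner (is.length + 1) cs is i
    aOuter p.1 p.2 (i + 1) n
  else cs
termination_by n - i

def order_list_by_index (chars : List String) (indexes : List Int) : String :=
  PySem.Str.join "" (aOuter chars indexes 0 indexes.length)

-- ===== PORT B =====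
def order_list_by_index_alt (chars : List String) (indexes : List Int) : String :=
  let result := (chars.zip indexes).foldl
      (fun r ci => PySem.List.pySetD r ci.2 ci.1) chars
  PySem.Str.join "" result

-- ===== PRECONDITION & SPEC =====
-- Pre_ excludes indexes that are not a permutation of range(len(indexes)), on which
-- A raises IndexError or loops forever, and length-mismatched inputs with more
-- indexes than chars, on which A and B generally raise IndexError (on the degenerate
-- already-in-place cases there where A does return, B returns the same value).
def Pre_order_list_by_index (chars : List String) (indexes : List Int) : Prop :=
  indexes.Perm ((List.range indexes.length).map (fun j : Nat => (j : Int))) ∧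
    indexes.length ≤ chars.length
instance (chars : List String) (indexes : List Int) : Decidable (Pre_order_list_by_index chars indexes) := by unfold Pre_order_list_by_index; infer_instance

def pvWitness_order_list_by_index : List String × List Int := (["ab", "c", "d"], [2, 0, 1])

def Spec_order_list_by_index (chars : List String) (indexes : List Int) (out : String) : Prop := out = order_list_by_index_alt chars indexes
instance (chars : List String) (indexes : List Int) (out : String) : Decidable (Spec_order_list_by_index chars indexes out) := by unfold Spec_order_list_by_index; infer_instance

-- ===== CLAIM (what is proved, stated in full; the proofs are below) =====
def Claim_equal_order_list_by_index : Prop := ∀ (chars : List String) (indexes : List Int), Dom_order_list_by_index chars indexes → Pre_order_list_by_index chars indexes → Spec_order_list_by_index chars indexes (order_list_by_index chars indexes)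

-- ===== LEMMAS AND PROOFS =====

-- zipping commutes with simultaneous set
theorem zip_set_eq {α β : Type} (as : List α) (bs : List β) (i : Nat) (x : α) (y : β) :
    (as.set i x).zip (bs.set i y) = (as.zip bs).set i (x, y) := by
  induction as generalizing bs i with
  | nil => simp
  | cons a as ih =>
    cases bs with
    | nil => simp
    | cons b bs => cases i with
      | zero => simp
      | succ i => simpa using ih bs i

-- with pairwise-distinct keys, find? returns the unique member with that key
theorem find_eq_of_mem_nodup {ps : List (String × Int)} (hnd : (ps.map Prod.snd).Nodup)
    {p : String × Int} (hp : p ∈ ps) : ps.find? (fun q => q.2 == p.2) = some p := by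
  induction ps with
  | nil => simp at hp
  | cons q ps ih =>
    simp only [List.map_cons, List.nodup_cons] at hnd
    rcases List.mem_cons.mp hp with rfl | hp'
    · simp
    · have hne : ¬ (q.2 == p.2) = true := by
        simp only [beq_iff_eq]
        intro h
        exact hnd.1 (h ▸ (List.mem_map.mpr ⟨p, hp', rfl⟩))
      simp only [List.find?_cons, hne]
      exact ih hnd.2 hp'

-- find? by key is invariant under permutation when keys are pairwise distinct
theorem find_perm {ps qs : List (String × Int)} (h : ps.Perm qs)
    (hnd : (ps.map Prod.snd).Nodup) (j : Int) :
    ps.find? (fun q => q.2 == j) = qs.find? (fun q => q.2 == j) := by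
  have hndq : (qs.map Prod.snd).Nodup := (h.map Prod.snd).nodup_iff.mp hnd
  cases hfp : ps.find? (fun q => q.2 == j) with
  | some p =>
    have hmem : p ∈ ps := List.mem_of_find?_eq_some hfp
    have hkey : p.2 = j := by simpa using List.find?_some hfp
    have : qs.find? (fun q => q.2 == p.2) = some p := find_eq_of_mem_nodup hndq (h.mem_iff.mp hmem)
    rw [← hkey]
    exact this.symm
  | none =>
    symm
    rw [List.find?_eq_none] at hfp ⊢
    intro x hx
    exact hfp x (h.mem_iff.mpr hx)

-- pointwise value of the scatter fold
theorem scatter_length (ps : List (String × Int)) (r : List String) :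
    (ps.foldl (fun r ci => PySem.List.pySetD r ci.2 ci.1) r).length = r.length := by
  induction ps generalizing r with
  | nil => rfl
  | cons p ps ih => simp [List.foldl_cons, ih, PySem.List.length_pySetD]

theorem scatter_get (ps : List (String × Int)) (r : List String)
    (hnd : (ps.map Prod.snd).Nodup)
    (hin : ∀ p ∈ ps, 0 ≤ p.2 ∧ p.2 < (r.length : Int)) (j : Nat) (hj : j < r.length) :
    (ps.foldl (fun r ci => PySem.List.pySetD r ci.2 ci.1) r)[j]? =
      match ps.find? (fun p => p.2 == (j : Int)) with
      | some p => some p.1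
      | none => r[j]? := by
  induction ps generalizing r with
  | nil => simp
  | cons p ps ih =>
    simp only [List.map_cons, List.nodup_cons] at hnd
    obtain ⟨hp0, hplt⟩ := hin p List.mem_cons_self
    have hset : PySem.List.pySetD r p.2 p.1 = r.set p.2.toNat p.1 :=
      PySem.List.pySetD_of_nonneg r p.1 hp0
    have hlen' : (r.set p.2.toNat p.1).length = r.length := by simp
    simp only [List.foldl_cons, hset]
    by_cases hkey : p.2 = (j : Int)
    · have hjt : p.2.toNat = j := by omega
      have hnot : ps.find? (fun q => q.2 == (j : Int)) = none := by
        rw [List.find?_eq_none]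
        intro x hx hbeq
        have hx2 : p.2 = x.2 := by
          have : x.2 = (j : Int) := by simpa using hbeq
          rw [hkey, this]
        exact hnd.1 (hx2 ▸ List.mem_map.mpr ⟨x, hx, rfl⟩)
      rw [ih (r.set p.2.toNat p.1) hnd.2
        (by intro q hq; simpa [hlen'] using hin q (List.mem_cons_of_mem _ hq)) (hlen' ▸ hj)]
      simp [hnot, hkey, hj]
    · have hjt : p.2.toNat ≠ j := by omega
      rw [ih (r.set p.2.toNat p.1) hnd.2
        (by intro q hq; simpa [hlen'] using hin q (List.mem_cons_of_mem _ hq)) (hlen' ▸ hj)]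
      have : (p.2 == (j : Int)) = false := by simpa using hkey
      simp [this, List.getElem?_set_ne hjt]

-- number of non-fixed positions (the inner loop's decreasing measure)
def unfix (is : List Int) : Nat :=
  (List.range is.length).countP (fun (j : Nat) => !(is[j]? == some (j : Int)))

theorem countP_lt_of_witness {l : List Nat} {p q : Nat → Bool} {x : Nat} (hx : x ∈ l)
    (himp : ∀ j ∈ l, q j = true → p j = true) (hpx : p x = true) (hqx : q x = false) :
    l.countP q < l.countP p := by
  induction l with
  | nil => simp at hx
  | cons a l ih =>
    rcases List.mem_cons.mp hx with rfl | hx'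
    · have hle : l.countP q ≤ l.countP p :=
        List.countP_mono_left (fun j hj => himp j (List.mem_cons_of_mem _ hj))
      simp only [List.countP_cons, hpx, hqx]
      simp
      omega
    · have h1 := ih hx' (fun j hj => himp j (List.mem_cons_of_mem _ hj))
      simp only [List.countP_cons]
      by_cases hq : q a = true
      · have h2 : p a = true := himp a List.mem_cons_self hq
        simp [hq, h2]
        omega
      · have hq' : q a = false := by simpa using hq
        simp only [hq']
        simp
        split <;> omega

theorem unfix_le (is : List Int) : unfix is ≤ is.length := by
  simpa [unfix] using List.countP_le_length (l := List.range is.length)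
    (p := fun (j : Nat) => !(is[j]? == some (j : Int)))

-- the inner loop: preserves the multiset of (char, index) pairs, fixes position i
theorem inner_spec : ∀ (fuel : Nat) (cs : List String) (is : List Int) (i : Nat),
    is.length ≤ cs.length → is.Nodup →
    (∀ x ∈ is, 0 ≤ x ∧ x < (is.length : Int)) →
    i < is.length → unfix is < fuel →
    (∀ j, j < i → is[j]? = some (j : Int)) →
    (aInner fuel cs is i).1.length = cs.length ∧
    (aInner fuel cs is i).2.length = is.length ∧
    ((aInner fuel cs is i).1.zip (aInner fuel cs is i).2).Perm (cs.zip is) ∧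
    (∀ j, j ≤ i → (aInner fuel cs is i).2[j]? = some (j : Int)) ∧
    (∀ j, is.length ≤ j → (aInner fuel cs is i).1[j]? = cs[j]?) := by
  intro fuel
  induction fuel with
  | zero => intro cs is i _ _ _ _ hf _; omega
  | succ fuel ih =>
    intro cs is i hlen hnd hbnd hi hf hfix
    have hgi : PySem.List.pyGet? is (i : Int) = some is[i] := by
      rw [PySem.List.pyGet?_natCast]; exact List.getElem?_eq_getElem hi
    by_cases hk : is[i] = (i : Int)
    · -- loop exit
      have hstep0 : aInner (fuel + 1) cs is i = (cs, is) := by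
        simp only [aInner, hgi]
        rw [if_pos hk]
      rw [hstep0]
      refine ⟨rfl, rfl, List.Perm.refl _, ?_, fun _ _ => rfl⟩
      intro j hj
      rcases Nat.lt_or_eq_of_le hj with h | h
      · exact hfix j h
      · subst h; rw [List.getElem?_eq_getElem hi, hk]
    · -- swap step
      have hkmem : is[i] ∈ is := List.getElem_mem hi
      set k : Int := is[i] with hkdef
      obtain ⟨hk0, hklt⟩ := hbnd k hkmem
      have hkn : k.toNat < is.length := by omega
      have hkcs : k.toNat < cs.length := by omega
      have hics : i < cs.length := by omega
      have hgci : PySem.List.pyGet? cs (i : Int) = some cs[i] := by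
        rw [PySem.List.pyGet?_natCast]; exact List.getElem?_eq_getElem hics
      have hkcast : k = (k.toNat : Int) := by omega
      have hgck : PySem.List.pyGet? cs k = some cs[k.toNat] := by
        conv_lhs => rw [hkcast]
        rw [PySem.List.pyGet?_natCast]; exact List.getElem?_eq_getElem hkcs
      have hgik : PySem.List.pyGet? is k = some is[k.toNat] := by
        conv_lhs => rw [hkcast]
        rw [PySem.List.pyGet?_natCast]; exact List.getElem?_eq_getElem hkn
      have hkti : k.toNat ≠ i := by
        intro h; exact hk (by omega)
      -- k.toNat is not a fixed position below i
      have hkgt : i < k.toNat := by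
        rcases Nat.lt_or_ge k.toNat i with hlt | hge
        · exfalso
          have h1 : is[k.toNat]? = some ((k.toNat : Int)) := hfix k.toNat hlt
          have h2 : is[k.toNat] = (k.toNat : Int) := by
            rw [List.getElem?_eq_getElem hkn] at h1; exact Option.some.inj h1
          have : i = k.toNat := by
            apply (List.Nodup.getElem_inj_iff hnd (hi := hi) (hj := hkn)).mp
            rw [h2, ← hkcast, ← hkdef]
          exact hkti this.symm
        · omega
      -- the new state after the simultaneous swap
      have hseti : ∀ {α : Type} (xs : List α) (v : α), PySem.List.pySetD xs (i : Int) v = xs.set i v := by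
        intro α xs v
        rw [PySem.List.pySetD_of_nonneg xs v (Int.natCast_nonneg i)]
        simp
      have hsetk : ∀ {α : Type} (xs : List α) (v : α), PySem.List.pySetD xs k v = xs.set k.toNat v := by
        intro α xs v; exact PySem.List.pySetD_of_nonneg xs v hk0
      have hstep : aInner (fuel + 1) cs is i =
          aInner fuel ((cs.set i cs[k.toNat]).set k.toNat cs[i])
                      ((is.set i is[k.toNat]).set k.toNat k) i := by
        simp only [aInner, hgi, if_neg hk, hgci, hgck, hgik, hseti, hsetk]
      set cs' := (cs.set i cs[k.toNat]).set k.toNat cs[i] with hcs'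
      set is' := (is.set i is[k.toNat]).set k.toNat k with his'
      have hlen1 : cs'.length = cs.length := by simp [hcs']
      have hlen2 : is'.length = is.length := by simp [his']
      -- is' is a transposition of is
      have hpermIs : is'.Perm is := by
        have := List.set_set_perm (as := is) (i := i) (j := k.toNat) hi hkn
        simpa [his'] using this
      -- the zipped pair lists are a transposition too
      have hzk : k.toNat < (cs.zip is).length := by rw [List.length_zip]; omega
      have hzi : i < (cs.zip is).length := by rw [List.length_zip]; omega
      have hzipeq : cs'.zip is' =
          ((cs.zip is).set i ((cs.zip is)[k.toNat]'hzk)).set k.toNat ((cs.zip is)[i]'hzi) := by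
        rw [hcs', his', zip_set_eq, zip_set_eq]
        congr 1
        · congr 1
          rw [List.getElem_zip]
        · rw [List.getElem_zip, ← hkdef]
      have hpermZip : (cs'.zip is').Perm (cs.zip is) := by
        rw [hzipeq]
        exact List.set_set_perm hzi hzk
      -- measure decreases
      have hik_ne : is[k.toNat] ≠ (k.toNat : Int) := by
        intro h
        have : i = k.toNat := by
          apply (List.Nodup.getElem_inj_iff hnd (hi := hi) (hj := hkn)).mp
          rw [h, ← hkcast, ← hkdef]
        exact hkti this.symm
      have hget' : ∀ j, j < is.length → is'[j]? =
          if j = k.toNat then some k else if j = i then some is[k.toNat] else is[j]? := by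
        intro j hj
        by_cases h1 : j = k.toNat
        · subst h1
          rw [if_pos rfl, his', List.getElem?_set_self (by simpa using hkn)]
        · rw [if_neg h1, his',
            List.getElem?_set_ne (fun h => h1 h.symm)]
          by_cases h2 : j = i
          · subst h2
            rw [if_pos rfl, List.getElem?_set_self hi]
          · rw [if_neg h2, List.getElem?_set_ne (fun h => h2 h.symm)]
      have hmeas : unfix is' < unfix is := by
        have hrange : unfix is' = (List.range is.length).countP
            (fun (j : Nat) => !(is'[j]? == some (j : Int))) := by
          simp [unfix, hlen2]
        rw [hrange]
        apply countP_lt_of_witness (x := k.toNat)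
          (List.mem_range.mpr hkn)
        · intro j hj hq
          have hjlt := List.mem_range.mp hj
          simp only [Bool.not_eq_eq_eq_not, Bool.not_true, beq_eq_false_iff_ne] at hq ⊢
          rw [hget' j hjlt] at hq
          by_cases h1 : j = k.toNat
          · subst h1; simp at hq; omega
          · by_cases h2 : j = i
            · subst h2
              rw [List.getElem?_eq_getElem hi, ← hkdef]
              simp only [ne_eq, Option.some.injEq]
              exact fun h => hk h
            · simpa [h1, h2] using hq
        · simp only [Bool.not_eq_eq_eq_not, Bool.not_true, beq_eq_false_iff_ne]
          rw [List.getElem?_eq_getElem hkn]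
          simp only [ne_eq, Option.some.injEq]
          exact hik_ne
        · rw [hget' k.toNat hkn]
          simp [← hkcast]
      -- fixed prefix preserved
      have hfix' : ∀ j, j < i → is'[j]? = some (j : Int) := by
        intro j hj
        rw [hget' j (by omega)]
        rw [if_neg (by omega), if_neg (by omega)]
        exact hfix j hj
      -- invariants for is'
      have hnd' : is'.Nodup := hpermIs.nodup_iff.mpr hnd
      have hbnd' : ∀ x ∈ is', 0 ≤ x ∧ x < (is'.length : Int) := by
        intro x hx
        rw [hlen2]
        exact hbnd x (hpermIs.mem_iff.mp hx)
      have htail : ∀ j, is.length ≤ j → cs'[j]? = cs[j]? := by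
        intro j hj
        rw [hcs', List.getElem?_set_ne (by omega), List.getElem?_set_ne (by omega)]
      obtain ⟨h1, h2, h3, h4, h5⟩ := ih cs' is' i (by omega) hnd' hbnd' (by omega)
        (by omega) hfix'
      rw [hstep]
      refine ⟨by omega, by omega, h3.trans hpermZip, h4, ?_⟩
      intro j hj
      rw [h5 j (by omega)]
      exact htail j (by omega)

-- the outer loop: ends with the index list equal to the identity permutation
theorem outer_spec (n : Nat) : ∀ (i : Nat) (cs : List String) (is : List Int),
    is.length = n → n ≤ cs.length → is.Nodup →
    (∀ x ∈ is, 0 ≤ x ∧ x < (n : Int)) →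
    (∀ j, j < i → is[j]? = some (j : Int)) →
    ∃ is' : List Int, is'.length = n ∧ (aOuter cs is i n).length = cs.length ∧
      ((aOuter cs is i n).zip is').Perm (cs.zip is) ∧
      (∀ j, j < n → is'[j]? = some (j : Int)) ∧
      (∀ j, n ≤ j → (aOuter cs is i n)[j]? = cs[j]?) := by
  intro i
  induction hm : n - i using Nat.strong_induction_on generalizing i with
  | _ m ihm =>
  intro cs is hlenI hlenC hnd hbnd hfix
  by_cases hi : i < n
  · obtain ⟨h1, h2, h3, h4, h5⟩ := inner_spec (is.length + 1) cs is i (by omega)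
      hnd (by rw [hlenI]; exact hbnd) (by omega)
      (by have := unfix_le is; omega) hfix
    set p := aInner (is.length + 1) cs is i with hp
    have hstep : aOuter cs is i n = aOuter p.1 p.2 (i + 1) n := by
      rw [aOuter, dif_pos hi]
    have hnd2 : p.2.Nodup := by
      have : p.2.Perm is := by
        have := h3.map Prod.snd
        rwa [List.map_snd_zip (by omega), List.map_snd_zip (by omega)] at this
      exact this.nodup_iff.mpr hnd
    have hperm2 : p.2.Perm is := by
      have := h3.map Prod.snd
      rwa [List.map_snd_zip (by omega), List.map_snd_zip (by omega)] at this
    obtain ⟨is', hi1, hi2, hi3, hi4, hi5⟩ := ihm (n - (i + 1)) (by omega) (i + 1) rfl p.1 p.2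
      (by omega) (by omega) hnd2
      (fun x hx => hbnd x (hperm2.mem_iff.mp hx))
      (fun j hj => h4 j (by omega))
    refine ⟨is', hi1, by rw [hstep, hi2, h1], by rw [hstep]; exact hi3.trans h3, hi4, ?_⟩
    intro j hj
    rw [hstep, hi5 j hj]
    exact h5 j (by omega)
  · rw [aOuter, dif_neg hi]
    exact ⟨is, hlenI, rfl, List.Perm.refl _, fun j hj => hfix j (by omega), fun _ _ => rfl⟩

-- ===== VERDICT (by name: the statement is the Claim_ definition above) =====
theorem order_list_by_index_spec : Claim_equal_order_list_by_index := by
  intro chars indexes _hDom hPre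
  obtain ⟨hperm, hlenle⟩ := hPre
  unfold Spec_order_list_by_index
  have hnd : indexes.Nodup := by
    apply hperm.nodup_iff.mpr
    apply List.Nodup.map _ List.nodup_range
    intro a b h
    simpa using h
  have hbnd : ∀ x ∈ indexes, 0 ≤ x ∧ x < (indexes.length : Int) := by
    intro x hx
    obtain ⟨j, hj, rfl⟩ := List.mem_map.mp (hperm.mem_iff.mp hx)
    have hj' := List.mem_range.mp hj
    omega
  obtain ⟨is', hi1, hi2, hi3, hi4, hi5⟩ := outer_spec indexes.length 0 chars indexes rfl
    hlenle hnd hbnd (by omega)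
  set n := indexes.length with hn
  set acs := aOuter chars indexes 0 n with hacs
  -- keys of the final pair list are the identity, pairwise distinct
  have hnd0 : ((chars.zip indexes).map Prod.snd).Nodup := by
    rwa [List.map_snd_zip (by omega)]
  have hndF : ((acs.zip is').map Prod.snd).Nodup := (hi3.map Prod.snd).nodup_iff.mpr hnd0
  -- A's element at j equals the unique pair with key j in the original zip
  have hA : ∀ j (hj : j < n), ((chars.zip indexes).find? (fun p => p.2 == (j : Int))) =
      some (acs[j]'(by omega), (j : Int)) := by
    intro j hj
    rw [← find_perm hi3 hndF (j : Int)]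
    have hjz : j < (acs.zip is').length := by rw [List.length_zip]; omega
    have hzj : (acs.zip is')[j] = (acs[j]'(by omega), is'[j]'(by omega)) := List.getElem_zip
    have hjv : is'[j]'(by omega) = (j : Int) := by
      have := hi4 j hj
      rwa [List.getElem?_eq_getElem (by omega), Option.some.injEq] at this
    have hpmem : ((acs[j]'(by omega), (j : Int))) ∈ acs.zip is' := by
      rw [← hjv, ← hzj]
      exact List.getElem_mem hjz
    simpa using find_eq_of_mem_nodup hndF hpmem
  -- B's result list equals A's final chars list
  unfold order_list_by_index order_list_by_index_alt
  rw [← hn, ← hacs]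
  congr 1
  apply List.ext_getElem?
  intro j
  have hin : ∀ p ∈ chars.zip indexes, 0 ≤ p.2 ∧ p.2 < (chars.length : Int) := by
    intro p hp
    have : p.2 ∈ indexes := by
      rw [← List.map_snd_zip (l₁ := chars) (l₂ := indexes) (by omega)]
      exact List.mem_map.mpr ⟨p, hp, rfl⟩
    have := hbnd p.2 this
    omega
  by_cases hj : j < chars.length
  · rw [scatter_get (chars.zip indexes) chars hnd0 hin j hj]
    by_cases hj2 : j < n
    · rw [hA j hj2, List.getElem?_eq_getElem (by omega)]
    · have hfnone : (chars.zip indexes).find? (fun p => p.2 == (j : Int)) = none := by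
        rw [List.find?_eq_none]
        intro x hx hbeq
        have hxm : x.2 ∈ indexes := by
          rw [← List.map_snd_zip (l₁ := chars) (l₂ := indexes) (by omega)]
          exact List.mem_map.mpr ⟨x, hx, rfl⟩
        have hb := hbnd x.2 hxm
        have : x.2 = (j : Int) := by simpa using hbeq
        omega
      rw [hfnone]
      exact hi5 j (by omega)
  · rw [List.getElem?_eq_none (by omega),
        List.getElem?_eq_none (by rw [scatter_length]; omega)]
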